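-- pv_equiv track=rewrite | github.com/r8025n/Advent-of-Code | 2023/7_1.py | detect_hand_type
-- ===== SOURCE A (Python) =====
-- def detect_hand_type(hand):
--     character_count = {}
--     for char in hand:
--         if char in character_count:
--             character_count[char] += 1
--         else:
--             character_count[char] = 1
--
--     counts = []
--     for key, value in character_count.items():
--         counts.append(value)
--     counts.sort(reverse=True)
--     hand_type = "".join([str(c) for c in counts])
--
--     return hand_type
-- ===== SOURCE B (Python) =====
-- def detect_hand_type(hand):
--     chars = sorted(hand)
--     counts = []
--     i = 0
--     n = len(chars)
--     while i < n:
--         j = i + 1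
--         while j < n and chars[j] == chars[i]:
--             j += 1
--         counts.append(j - i)
--         i = j
--     counts.sort(reverse=True)
--     return "".join(str(c) for c in counts)
-- ===== Notes on version B (the rewrite author's own statement) =====
-- stated objective: alternative
-- what changed: Replaces the hash-based frequency dict with sort-the-characters-then-scan-consecutive-runs: counts are the lengths of maximal runs of equal characters in the sorted hand.
import Mathlib
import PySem

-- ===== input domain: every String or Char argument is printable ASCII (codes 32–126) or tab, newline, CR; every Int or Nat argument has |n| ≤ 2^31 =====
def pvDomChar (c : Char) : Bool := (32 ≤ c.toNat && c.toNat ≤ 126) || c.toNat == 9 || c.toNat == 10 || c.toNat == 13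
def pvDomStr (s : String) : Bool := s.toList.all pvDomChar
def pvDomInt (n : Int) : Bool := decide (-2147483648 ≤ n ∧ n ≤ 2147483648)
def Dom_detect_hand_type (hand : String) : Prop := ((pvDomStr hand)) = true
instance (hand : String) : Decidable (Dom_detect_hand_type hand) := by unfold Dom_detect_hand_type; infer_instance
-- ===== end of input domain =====

-- B counts multiplicities by sorting the characters and scanning consecutive runs instead of
-- building a frequency dict; same cost class, a different algorithm (objective: alternative).

-- ===== PORT A =====
def detect_hand_type (hand : String) : String :=
  let character_count : PySem.Dict Char Int :=
    hand.toList.foldl (fun d char =>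
      if d.contains char then d.insert char (d.getD char 0 + 1)
      else d.insert char 1) PySem.Dict.empty
  let counts : List Int :=
    character_count.items.foldl (fun acc kv => acc ++ [kv.2]) []
  let counts := PySem.List.sorted counts (fun x => x) true
  PySem.Str.join "" (counts.map (fun c => PySem.Int.toStr c))

-- ===== PORT B =====
-- the inner while loop: length of the maximal run of chars equal to the first one, then recurse past it
def runLengths (l : List Char) : List Int :=
  match l with
  | [] => []
  | c :: rest =>
      ((rest.takeWhile (· == c)).length + 1 : Int) :: runLengths (rest.dropWhile (· == c))
termination_by l.length
decreasing_by
  simp only [List.length_cons]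
  exact Nat.lt_succ_of_le (List.Sublist.length_le (List.dropWhile_sublist _))

def detect_hand_type_alt (hand : String) : String :=
  let chars := PySem.List.sorted hand.toList (fun c => c) false
  let counts := runLengths chars
  let counts := PySem.List.sorted counts (fun x => x) true
  PySem.Str.join "" (counts.map (fun c => PySem.Int.toStr c))

-- ===== PRECONDITION & SPEC =====
def Spec_detect_hand_type (hand : String) (out : String) : Prop := out = detect_hand_type_alt hand
instance (hand : String) (out : String) : Decidable (Spec_detect_hand_type hand out) := by unfold Spec_detect_hand_type; infer_instance

-- ===== CLAIM (what is proved, stated in full; the proofs are below) =====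
def Claim_equal_detect_hand_type : Prop := ∀ (hand : String), Dom_detect_hand_type hand → Spec_detect_hand_type hand (detect_hand_type hand)

-- ===== LEMMAS AND PROOFS =====

-- two reverse-sorted permutations of the same multiset of Ints coincide
theorem sorted_rev_eq_of_perm (xs ys : List Int) (h : xs.Perm ys) :
    PySem.List.sorted xs (fun x => x) true = PySem.List.sorted ys (fun x => x) true :=
  List.Perm.eq_of_pairwise (le := fun a b : Int => b ≤ a)
    (fun _ _ _ _ h1 h2 => le_antisymm h2 h1)
    (PySem.List.sorted_pairwise_rev xs (fun x => x))
    (PySem.List.sorted_pairwise_rev ys (fun x => x))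
    ((PySem.List.sorted_perm xs _ true).trans (h.trans (PySem.List.sorted_perm ys _ true).symm))

-- the head of dropWhile fails the predicate
theorem dropWhile_head_false {α : Type} (p : α → Bool) (l : List α) (hd0 : α) (tl : List α)
    (h : l.dropWhile p = hd0 :: tl) : p hd0 = false := by
  induction l with
  | nil => simp at h
  | cons a l ih =>
    rw [List.dropWhile_cons] at h
    by_cases hp : p a
    · exact ih (by simpa [hp] using h)
    · obtain ⟨rfl, -⟩ := List.cons.injEq .. ▸ (by simpa [hp] using h : a = hd0 ∧ l = tl)
      simpa using hp

-- a sorted list never shows its leading element again after the first run ends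
theorem not_mem_dropWhile (c : Char) (rest : List Char)
    (hcle : ∀ x ∈ rest, c ≤ x) (hrp : rest.Pairwise (· ≤ ·)) :
    c ∉ rest.dropWhile (· == c) := by
  intro hc
  cases hdd : rest.dropWhile (· == c) with
  | nil => rw [hdd] at hc; simp at hc
  | cons hd0 tl =>
    rw [hdd] at hc
    have hsub : (hd0 :: tl).Sublist rest := hdd ▸ List.dropWhile_sublist _
    have hne : ¬ (hd0 == c) = true := by
      have := dropWhile_head_false (· == c) rest hd0 tl hdd
      simp_all
    have hne' : hd0 ≠ c := fun he => hne (by simp [he])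
    have hle1 : c ≤ hd0 := hcle hd0 (hsub.mem (by simp))
    rcases List.mem_cons.mp hc with he | htl
    · exact hne' he.symm
    · have hdp : (hd0 :: tl).Pairwise (· ≤ ·) := hrp.sublist hsub
      exact hne' (le_antisymm ((List.pairwise_cons.mp hdp).1 c htl) hle1)

-- run lengths of a sorted list are (up to order) the multiplicities of its distinct elements
theorem runLengths_perm (l : List Char) (h : l.Pairwise (· ≤ ·)) :
    (runLengths l).Perm ((PySem.Set.ofList l).map (fun c => (l.count c : Int))) := by
  induction l using runLengths.induct with
  | case1 => simp [runLengths]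
  | case2 c rest ih =>
    have hrest : rest.takeWhile (· == c) ++ rest.dropWhile (· == c) = rest :=
      List.takeWhile_append_dropWhile
    generalize htdef : rest.takeWhile (· == c) = t at *
    generalize hddef : rest.dropWhile (· == c) = d at *
    have ht : ∀ x ∈ t, x = c := by
      intro x hx
      have := List.mem_takeWhile_imp (htdef ▸ hx)
      exact eq_of_beq this
    have hcle : ∀ x ∈ rest, c ≤ x := (List.pairwise_cons.mp h).1
    have hrp : rest.Pairwise (· ≤ ·) := (List.pairwise_cons.mp h).2
    have hdp : d.Pairwise (· ≤ ·) := hrp.sublist (hddef ▸ List.dropWhile_sublist _)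
    have hcd : c ∉ d := hddef ▸ not_mem_dropWhile c rest hcle hrp
    have hcnt_t : t.count c = t.length := List.count_eq_length.mpr (fun b hb => (ht b hb).symm)
    have hcnt_d : d.count c = 0 := List.count_eq_zero.mpr hcd
    -- the distinct elements of c :: rest are, as a set, c plus the distinct elements of d
    have hsetperm : (PySem.Set.ofList (c :: rest)).Perm (c :: PySem.Set.ofList d) := by
      rw [List.perm_ext_iff_of_nodup (PySem.Set.nodup_ofList _)
        (List.nodup_cons.mpr ⟨fun hc => hcd ((PySem.Set.mem_ofList _ _).mp hc), PySem.Set.nodup_ofList _⟩)]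
      intro x
      simp only [PySem.Set.mem_ofList, List.mem_cons]
      constructor
      · rintro (he | hx)
        · exact Or.inl he
        · rw [← hrest] at hx
          rcases List.mem_append.mp hx with hx | hx
          · exact Or.inl (ht x hx)
          · exact Or.inr hx
      · rintro (he | hx)
        · exact Or.inl he
        · exact Or.inr (by rw [← hrest]; exact List.mem_append.mpr (Or.inr hx))
    have hfc : (((c :: rest).count c : Nat) : Int) = (t.length + 1 : Int) := by
      rw [List.count_cons_self, ← hrest, List.count_append, hcnt_t, hcnt_d]
      push_cast; ring
    have hmapd : (PySem.Set.ofList d).map (fun x => ((c :: rest).count x : Int))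
        = (PySem.Set.ofList d).map (fun x => (d.count x : Int)) := by
      apply List.map_congr_left
      intro x hx
      have hxd : x ∈ d := (PySem.Set.mem_ofList _ _).mp hx
      have hxc : x ≠ c := fun he => hcd (he ▸ hxd)
      have hxt : x ∉ t := fun hxt => hxc (ht x hxt)
      rw [← hrest]
      simp [List.count_append, Ne.symm hxc, List.count_eq_zero.mpr hxt]
    have h1 : runLengths (c :: rest) = (t.length + 1 : Int) :: runLengths d := by
      rw [runLengths, htdef, hddef]
    have h2 : ((t.length + 1 : Int) :: runLengths d).Perm
        ((t.length + 1 : Int) :: (PySem.Set.ofList d).map (fun x => (d.count x : Int))) :=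
      (ih hdp).cons _
    have h3 : (t.length + 1 : Int) :: (PySem.Set.ofList d).map (fun x => (d.count x : Int))
        = (c :: PySem.Set.ofList d).map (fun x => ((c :: rest).count x : Int)) := by
      rw [List.map_cons, hfc, hmapd]
    rw [h1]
    exact (h2.trans (h3 ▸ (hsetperm.map _).symm))

-- A's counting loop is the Counter fold
theorem foldA_eq_counter (xs : List Char) :
    xs.foldl (fun d char =>
      if d.contains char then d.insert char (d.getD char 0 + 1)
      else d.insert char 1) PySem.Dict.empty = PySem.Dict.counter xs := by
  have hstep : (fun (d : PySem.Dict Char Int) char =>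
      if d.contains char then d.insert char (d.getD char 0 + 1)
      else d.insert char 1)
      = fun d x => d.insert x (d.getD x 0 + 1) := by
    funext d c
    by_cases hc : d.contains c = true
    · simp [hc]
    · have h0 : d.getD c 0 = 0 :=
        PySem.Dict.getD_of_not_contains d 0 (by simpa using hc)
      simp [hc, h0]
  rw [hstep, PySem.Dict.foldl_insert_getD_add_one_eq_counter]

-- A's counts list is a permutation of B's run-lengths list
theorem counts_perm (xs : List Char) :
    (runLengths (PySem.List.sorted xs (fun c => c) false)).Perm
      ((PySem.Dict.counter xs).items.map (·.2)) := by
  set s := PySem.List.sorted xs (fun c => c) false with hs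
  have hsp : s.Perm xs := PySem.List.sorted_perm xs _ false
  have h1 : (runLengths s).Perm ((PySem.Set.ofList s).map (fun c => (s.count c : Int))) :=
    runLengths_perm s (PySem.List.sorted_pairwise xs (fun c => c))
  have h2 : (PySem.Set.ofList s).map (fun c => (s.count c : Int))
      = (PySem.Set.ofList s).map (fun c => (xs.count c : Int)) := by
    apply List.map_congr_left
    intro c _
    rw [hsp.count_eq]
  have h3 : (PySem.Set.ofList s).Perm (PySem.Set.ofList xs) := by
    rw [List.perm_ext_iff_of_nodup (PySem.Set.nodup_ofList _) (PySem.Set.nodup_ofList _)]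
    intro x
    simp only [PySem.Set.mem_ofList]
    exact hsp.mem_iff
  have h4 : (PySem.Dict.counter xs).items.map (·.2)
      = (PySem.Set.ofList xs).map (fun c => (xs.count c : Int)) := by
    rw [PySem.Dict.items_counter, List.map_map]
    rfl
  rw [h4]
  exact (h1.trans (h2 ▸ (h3.map _)))

-- ===== VERDICT (by name: the statement is the Claim_ definition above) =====
theorem detect_hand_type_spec : Claim_equal_detect_hand_type := by
  intro hand _
  unfold Spec_detect_hand_type detect_hand_type detect_hand_type_alt
  simp only [foldA_eq_counter, PySem.List.foldl_append_singleton_eq_map]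
  congr 1
  congr 1
  exact sorted_rev_eq_of_perm _ _ (counts_perm hand.toList).symm
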